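-- pv_equiv track=rewrite | github.com/jclements3/trefoil | modern/test_meter_exceptions.py | count_measures
-- ===== SOURCE A (Python) =====
-- def count_measures(abc: str) -> int:
--     """Count the number of measures in the music body (bars of notes)."""
--     # Extract body.
--     lines = abc.splitlines()
--     body_start = 0
--     for i, line in enumerate(lines):
--         if line.startswith("K:"):
--             body_start = i + 1
--             break
--     body = "\n".join(lines[body_start:])
--     # Count '|' characters that are not inside annotations.
--     n = 0
--     in_quote = False
--     for ch in body:
--         if ch == '"':
--             in_quote = not in_quote
--             continue
--         if ch == "|" and not in_quote:
--             n += 1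
--     return n
-- ===== SOURCE B (Python) =====
-- def count_measures(abc: str) -> int:
--     """Count the number of measures in the music body (bars of notes)."""
--     lines = abc.splitlines()
--     body_start = next((i + 1 for i, line in enumerate(lines) if line.startswith("K:")), 0)
--     body = "\n".join(lines[body_start:])
--     # Splitting on '"' alternates outside/inside-quote chunks; count bars in the outside ones.
--     segments = body.split('"')
--     return sum(seg.count("|") for seg in segments[::2])
-- ===== Notes on version B (the rewrite author's own statement) =====
-- stated objective: simpler
-- what changed: Replaces the character-by-character quote-toggle state machine with a partition of the body at quote marks, summing bar counts over the even-indexed (outside-quote) chunks, and the index loop for body_start with next() over the enumeration.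
import Mathlib
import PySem

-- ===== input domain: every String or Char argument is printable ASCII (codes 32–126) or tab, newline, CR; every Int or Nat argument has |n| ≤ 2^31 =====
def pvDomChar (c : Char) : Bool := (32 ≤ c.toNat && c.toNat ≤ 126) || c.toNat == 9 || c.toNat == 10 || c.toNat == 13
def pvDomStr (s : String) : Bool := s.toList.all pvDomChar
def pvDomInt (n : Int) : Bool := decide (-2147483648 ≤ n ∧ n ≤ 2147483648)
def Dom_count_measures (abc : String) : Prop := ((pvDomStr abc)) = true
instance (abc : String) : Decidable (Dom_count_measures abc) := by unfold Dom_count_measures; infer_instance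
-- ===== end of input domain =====

-- B replaces A's char-by-char in_quote state machine by split('"') + summing '|' counts
-- over the even-indexed (outside-quote) segments; objective: simpler.


-- ===== PORT A =====
-- A's body_start loop: first line starting with "K:" gives i+1, break; else stays 0.
def aBodyStart : List String → Int → Int
  | [], _ => 0
  | line :: rest, i =>
    if PySem.Str.startswith line "K:" then i + 1 else aBodyStart rest (i + 1)

-- one step of A's char loop over (n, in_quote)
def aStep (st : Int × Bool) (ch : Char) : Int × Bool :=
  if ch = '"' then (st.1, !st.2)
  else if ch = '|' ∧ st.2 = false then (st.1 + 1, st.2) else st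

def count_measures (abc : String) : Int :=
  let lines := PySem.Str.splitlines abc
  let body_start := aBodyStart lines 0
  let body := PySem.Str.join "\n" (PySem.List.slice lines (some body_start) none)
  (body.toList.foldl aStep (0, false)).1

-- ===== PORT B =====
-- port of segments[::2] (every second element from index 0)
def everyOther : List (List Char) → List (List Char)
  | [] => []
  | [x] => [x]
  | x :: _ :: rest => x :: everyOther rest

def count_measures_alt (abc : String) : Int :=
  let lines := PySem.Str.splitlines abc
  let body_start : Int :=
    match lines.findIdx? (fun l => PySem.Str.startswith l "K:") with
    | some i => (i : Int) + 1
    | none => 0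
  let body := PySem.Str.join "\n" (PySem.List.slice lines (some body_start) none)
  let segments := body.toList.splitOn '"'   -- body.split('"'), single-char separator
  ((everyOther segments).map (fun seg => (PySem.Chars.count seg ['|'] : Int))).sum

-- ===== PRECONDITION & SPEC =====
def Spec_count_measures (abc : String) (out : Int) : Prop := out = count_measures_alt abc
instance (abc : String) (out : Int) : Decidable (Spec_count_measures abc out) := by unfold Spec_count_measures; infer_instance

-- ===== CLAIM (what is proved, stated in full; the proofs are below) =====
def Claim_equal_count_measures : Prop := ∀ (abc : String), Dom_count_measures abc → Spec_count_measures abc (count_measures abc)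

-- ===== LEMMAS AND PROOFS =====

-- A's body_start loop equals the findIdx?-based computation, for any starting index
theorem aBodyStart_eq (ls : List String) (i : Int) :
    aBodyStart ls i =
      match ls.findIdx? (fun l => PySem.Str.startswith l "K:") with
      | some j => i + (j : Int) + 1
      | none => 0 := by
  induction ls generalizing i with
  | nil => simp [aBodyStart]
  | cons a t ih =>
    rw [List.findIdx?_cons]
    by_cases h : PySem.Str.startswith a "K:" = true
    · rw [if_pos h]
      simp only [aBodyStart, h, if_pos]
      simp
    · rw [if_neg h]
      have h' : PySem.Str.startswith a "K:" = false := by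
        cases hb : PySem.Str.startswith a "K:" <;> simp_all
      simp only [aBodyStart, h', Bool.false_eq_true, ite_false]
      rw [ih (i + 1)]
      cases ht : t.findIdx? (fun l => PySem.Str.startswith l "K:") with
      | none => simp
      | some j => simp only [Option.map_some]; push_cast; ring_nf

theorem aBodyStart_zero (ls : List String) :
    aBodyStart ls 0 =
      match ls.findIdx? (fun l => PySem.Str.startswith l "K:") with
      | some j => (j : Int) + 1
      | none => 0 := by
  rw [aBodyStart_eq]
  cases ls.findIdx? (fun l => PySem.Str.startswith l "K:") <;> simp

-- the state machine as a structural function of the remaining chars and the quote state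
def countQ : List Char → Bool → Int
  | [], _ => 0
  | c :: t, q =>
    if c = '"' then countQ t (!q)
    else (if c = '|' ∧ q = false then 1 else 0) + countQ t q

theorem foldl_aStep_eq (l : List Char) (n : Int) (q : Bool) :
    (l.foldl aStep (n, q)).1 = n + countQ l q := by
  induction l generalizing n q with
  | nil => simp [countQ]
  | cons c t ih =>
    rw [List.foldl_cons]
    by_cases h1 : c = '"'
    · rw [show aStep (n, q) c = (n, !q) by simp [aStep, h1]]
      rw [ih]
      simp only [countQ, h1, if_pos]
    · by_cases h2 : c = '|' ∧ q = false
      · rw [show aStep (n, q) c = (n + 1, q) by simp [aStep, h1, h2.1, h2.2]]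
        rw [ih]
        simp only [countQ, h1, ite_false, if_neg, not_false_iff]
        rw [if_pos h2]; ring
      · rw [show aStep (n, q) c = (n, q) by
          simp only [aStep]; rw [if_neg h1, if_neg h2]]
        rw [ih]
        simp only [countQ, h1, ite_false, if_neg, not_false_iff]
        rw [if_neg h2]; ring

-- PySem.Chars.count with a single-character needle is List.count
theorem count_go_singleton (c : Char) (fuel : Nat) (l : List Char) (acc : Nat)
    (h : l.length ≤ fuel) :
    PySem.Chars.count.go [c] fuel l acc = acc + l.count c := by
  induction fuel generalizing l acc with
  | zero =>
    cases l with
    | nil => simp [PySem.Chars.count.go]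
    | cons a t => simp at h
  | succ f ih =>
    cases l with
    | nil => simp [PySem.Chars.count.go]
    | cons a t =>
      simp only [List.length_cons, Nat.succ_le_succ_iff] at h
      by_cases hc : a = c
      · have hp : List.isPrefixOf [c] (a :: t) = true := by
          simp [List.isPrefixOf, hc]
        simp only [PySem.Chars.count.go, hp, if_pos, List.length_cons, List.length_nil,
          List.drop_succ_cons, List.drop_zero]
        rw [ih t (acc + 1) h, List.count_cons]
        simp [hc]; omega
      · have hp : List.isPrefixOf [c] (a :: t) = false := by
          simp only [List.isPrefixOf, List.isPrefixOf_nil_left, Bool.and_true,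
            beq_eq_false_iff_ne, ne_eq]
          exact fun hh => hc hh.symm
        simp only [PySem.Chars.count.go, hp, Bool.false_eq_true, if_neg, not_false_iff]
        rw [ih t acc h, List.count_cons]
        simp [hc]

theorem count_singleton (s : List Char) (c : Char) :
    PySem.Chars.count s [c] = s.count c := by
  simp only [PySem.Chars.count, List.isEmpty_cons, Bool.false_eq_true, if_neg, not_false_iff]
  simpa using count_go_singleton c s.length s 0 le_rfl

-- sum of '|'-counts over even-indexed segments
def sumE (S : List (List Char)) : Int :=
  ((everyOther S).map (fun seg => (PySem.Chars.count seg ['|'] : Int))).sum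

theorem everyOther_cons (x : List Char) (S : List (List Char)) :
    everyOther (x :: S) = x :: everyOther S.tail := by
  cases S with
  | nil => simp [everyOther]
  | cons y t => simp [everyOther]

theorem sumE_cons (x : List Char) (S : List (List Char)) :
    sumE (x :: S) = (PySem.Chars.count x ['|'] : Int) + sumE S.tail := by
  simp [sumE, everyOther_cons]

-- the split-based even/odd sums compute the state machine from either quote state
theorem sumE_splitOn (cs : List Char) :
    sumE (cs.splitOn '"') = countQ cs false ∧
    sumE (cs.splitOn '"').tail = countQ cs true := by
  induction cs with
  | nil => simp [List.splitOn, List.splitOnP_nil, sumE, everyOther, count_singleton, countQ]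
  | cons c t ih =>
    by_cases hq : c = '"'
    · have hsplit : (c :: t).splitOn '"' = [] :: t.splitOn '"' := by
        simp [List.splitOn, List.splitOnP_cons, hq]
      rw [hsplit]
      refine ⟨?_, ?_⟩
      · rw [sumE_cons]
        simp only [countQ, hq, if_pos, count_singleton, List.count_nil]
        rw [ih.2]; simp
      · rw [List.tail_cons]
        simp only [countQ, hq, if_pos]
        rw [ih.1]; simp
    · have hsplit : (c :: t).splitOn '"' = (t.splitOn '"').modifyHead (c :: ·) := by
        simp only [List.splitOn, List.splitOnP_cons]
        have hbe : (c == '"') = false := by simp [hq]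
        simp [hbe]
      obtain ⟨s0, S, hS⟩ := List.exists_cons_of_ne_nil
        (List.splitOnP_ne_nil (fun a => a == '"') t)
      have hS' : t.splitOn '"' = s0 :: S := hS
      rw [hS'] at hsplit ih
      rw [hsplit, List.modifyHead_cons]
      refine ⟨?_, ?_⟩
      · rw [sumE_cons]
        rw [sumE_cons] at ih
        simp only [countQ, hq, ite_false, if_neg, not_false_iff]
        rw [← ih.1, count_singleton, count_singleton, List.count_cons]
        by_cases hb : c = '|' <;> simp [hb] <;> push_cast <;> ring
      · rw [List.tail_cons]
        rw [List.tail_cons] at ih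
        simp only [countQ, hq, ite_false, if_neg, not_false_iff]
        rw [ih.2]
        simp

-- ===== VERDICT (by name: the statement is the Claim_ definition above) =====
theorem count_measures_spec : Claim_equal_count_measures := by
  intro abc _
  unfold Spec_count_measures count_measures count_measures_alt
  simp only []
  rw [aBodyStart_zero]
  rw [foldl_aStep_eq]
  have := (sumE_splitOn (PySem.Str.join "\n"
    (PySem.List.slice (PySem.Str.splitlines abc)
      (some (match (PySem.Str.splitlines abc).findIdx?
          (fun l => PySem.Str.startswith l "K:") with
        | some j => (j : Int) + 1
        | none => 0)) none)).toList).1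
  simp only [sumE] at this
  omega
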